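-- pv_equiv track=rewrite | github.com/Raakshass/DigiKisan | backend/backup_original_models/slot_filler.py | _match_from_list
-- ===== SOURCE A (Python) =====
-- from typing import Optional, Dict, List, Any
--
-- def _match_from_list(text: str, lst: List[str]) -> Optional[str]:
--     if not text:
--         return None
--     text_low = text.lower().strip()
--     matches = []
--     for w in lst:
--         if w in text_low or text_low in w:
--             matches.append(w)
--     if not matches:
--         return None
--     # Return longest match
--     matches.sort(key=lambda x: -len(x))
--     return matches[0]
-- ===== SOURCE B (Python) =====
-- from typing import Optional, List
--
-- def _match_from_list(text: str, lst: List[str]) -> Optional[str]: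
--     if not text:
--         return None
--     text_low = text.lower().strip()
--     best = None
--     best_len = -1
--     for w in lst:
--         if (w in text_low or text_low in w) and len(w) > best_len:
--             best = w
--             best_len = len(w)
--     return best
-- ===== Notes on version B (the rewrite author's own statement) =====
-- stated objective: simpler
-- what changed: Replaced the collect-matches-then-stable-sort-by-negative-length-then-take-first pipeline by a single streaming scan keeping the current best match and its length (strict > so the first of equal-length matches wins).
import Mathlib
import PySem

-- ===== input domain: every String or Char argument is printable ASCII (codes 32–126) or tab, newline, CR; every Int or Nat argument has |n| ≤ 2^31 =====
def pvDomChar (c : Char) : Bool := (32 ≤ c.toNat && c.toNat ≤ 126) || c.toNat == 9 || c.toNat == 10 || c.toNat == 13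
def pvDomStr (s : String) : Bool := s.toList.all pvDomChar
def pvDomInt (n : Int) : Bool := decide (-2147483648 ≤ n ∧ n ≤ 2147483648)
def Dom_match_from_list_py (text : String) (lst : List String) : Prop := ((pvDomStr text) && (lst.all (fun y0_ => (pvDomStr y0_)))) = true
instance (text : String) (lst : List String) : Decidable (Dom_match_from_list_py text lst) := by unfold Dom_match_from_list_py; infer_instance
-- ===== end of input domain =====

-- B replaces A's collect-matches/stable-sort-by-negative-length/take-first pipeline by one streaming best-so-far scan (simpler decomposition, same results).

-- ===== PORT A =====
def match_from_list_py (text : String) (lst : List String) : Option String :=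
  if text = "" then none
  else
    let text_low := PySem.Str.strip (PySem.Str.lower text)
    let matchesL := lst.foldl (fun acc w =>
      if PySem.Str.isIn w text_low || PySem.Str.isIn text_low w then acc ++ [w] else acc) []
    if matchesL = [] then none
    else PySem.List.pyGet? (PySem.List.sorted matchesL (fun x => -(PySem.Str.len x)) false) 0

-- ===== PORT B =====
def match_from_list_py_alt (text : String) (lst : List String) : Option String :=
  if text = "" then none
  else
    let text_low := PySem.Str.strip (PySem.Str.lower text)
    (lst.foldl (fun (st : Option String × Int) w =>
        if (PySem.Str.isIn w text_low || PySem.Str.isIn text_low w) && decide (st.2 < PySem.Str.len w)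
        then (some w, PySem.Str.len w) else st) (none, -1)).1

-- ===== PRECONDITION & SPEC =====
def Spec_match_from_list_py (text : String) (lst : List String) (out : Option String) : Prop := out = match_from_list_py_alt text lst
instance (text : String) (lst : List String) (out : Option String) : Decidable (Spec_match_from_list_py text lst out) := by unfold Spec_match_from_list_py; infer_instance

-- ===== CLAIM (what is proved, stated in full; the proofs are below) =====
def Claim_equal_match_from_list_py : Prop := ∀ (text : String) (lst : List String), Dom_match_from_list_py text lst → Spec_match_from_list_py text lst (match_from_list_py text lst)

-- ===== LEMMAS AND PROOFS =====

-- A's append loop is filtering by the match predicate.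
theorem foldl_append_filter (tl : String) (lst acc : List String) :
    lst.foldl (fun acc w => if PySem.Str.isIn w tl || PySem.Str.isIn tl w then acc ++ [w] else acc) acc
      = acc ++ lst.filter (fun w => PySem.Str.isIn w tl || PySem.Str.isIn tl w) := by
  induction lst generalizing acc with
  | nil => simp
  | cons x xs ih =>
    rw [List.foldl_cons, List.filter_cons]
    by_cases h : (PySem.Str.isIn x tl || PySem.Str.isIn tl x) = true
    · rw [if_pos h, if_pos h, ih, List.append_assoc, List.singleton_append]
    · rw [if_neg h, if_neg h, ih]

-- B's scan over lst equals the pure best-so-far scan over the filtered list.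
theorem foldl_scan_filter (tl : String) (lst : List String) (st : Option String × Int) :
    lst.foldl (fun (st : Option String × Int) w =>
        if (PySem.Str.isIn w tl || PySem.Str.isIn tl w) && decide (st.2 < PySem.Str.len w)
        then (some w, PySem.Str.len w) else st) st
      = (lst.filter (fun w => PySem.Str.isIn w tl || PySem.Str.isIn tl w)).foldl
          (fun (st : Option String × Int) w =>
            if decide (st.2 < PySem.Str.len w) then (some w, PySem.Str.len w) else st) st := by
  induction lst generalizing st with
  | nil => rfl
  | cons x xs ih =>
    rw [List.foldl_cons, List.filter_cons]
    by_cases h : (PySem.Str.isIn x tl || PySem.Str.isIn tl x) = true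
    · rw [if_pos h, h, Bool.true_and, List.foldl_cons]
      exact ih _
    · rw [if_neg h, Bool.not_eq_true] at *
      rw [h, Bool.false_and]
      exact ih st
    
theorem insertBy_cons (before : String → String → Bool) (x y : String) (t : List String) :
    PySem.List.insertBy before x (y :: t)
      = if before x y then x :: y :: t else y :: PySem.List.insertBy before x t := rfl

theorem insertBy_nil (before : String → String → Bool) (x : String) :
    PySem.List.insertBy before x [] = [x] := rfl

-- Head of the insertion-sorted (longest-first) list tracked against the best-so-far scan.
theorem scan_eq_sorted_head (ms : List String) (m : String) (acc : List String)
    (hacc : acc.head? = some m) :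
    (ms.foldl (fun (st : Option String × Int) w =>
        if decide (st.2 < PySem.Str.len w) then (some w, PySem.Str.len w) else st)
        (some m, PySem.Str.len m)).1
      = (ms.foldl (fun acc x =>
          PySem.List.insertBy (fun a b => decide (PySem.Str.len b < PySem.Str.len a)) x acc) acc).head? := by
  induction ms generalizing m acc with
  | nil => simpa using hacc.symm
  | cons x xs ih =>
    cases acc with
    | nil => simp at hacc
    | cons y t =>
      have hy : y = m := by simpa using hacc
      subst hy
      rw [List.foldl_cons, List.foldl_cons, insertBy_cons]
      by_cases h : PySem.Str.len y < PySem.Str.len x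
      · rw [if_pos (decide_eq_true h), if_pos (decide_eq_true h)]
        exact ih x (x :: y :: t) rfl
      · rw [if_neg (by simpa using h), if_neg (by simpa using h)]
        exact ih y _ rfl

theorem str_len_nonneg (s : String) : 0 ≤ PySem.Str.len s := by
  simp [PySem.Str.len_eq]

-- The core: the best-so-far scan from (none, -1) yields the head of the stable sort by -len.
theorem scan_eq_sorted_main (ms : List String) :
    (ms.foldl (fun (st : Option String × Int) w =>
        if decide (st.2 < PySem.Str.len w) then (some w, PySem.Str.len w) else st) (none, -1)).1
      = (PySem.List.sorted ms (fun x => -(PySem.Str.len x)) false).head? := by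
  rw [PySem.List.sorted_eq_foldl_insertBy]
  have hb : (fun (a b : String) => decide (-(PySem.Str.len a) < -(PySem.Str.len b)))
      = (fun a b => decide (PySem.Str.len b < PySem.Str.len a)) := by
    funext a b; exact decide_eq_decide.mpr neg_lt_neg_iff
  rw [hb]
  cases ms with
  | nil => rfl
  | cons z rest =>
    have hz : (-1 : Int) < PySem.Str.len z := lt_of_lt_of_le (by norm_num) (str_len_nonneg z)
    rw [List.foldl_cons, List.foldl_cons, if_pos (decide_eq_true hz), insertBy_nil]
    exact scan_eq_sorted_head rest z [z] rfl

-- ===== VERDICT (by name: the statement is the Claim_ definition above) =====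
theorem match_from_list_py_spec : Claim_equal_match_from_list_py := by
  intro text lst _
  unfold Spec_match_from_list_py match_from_list_py match_from_list_py_alt
  by_cases ht : text = ""
  · simp [ht]
  · simp only [ht, if_false]
    rw [foldl_append_filter, foldl_scan_filter, List.nil_append]
    set tl := PySem.Str.strip (PySem.Str.lower text)
    by_cases hm : lst.filter (fun w => PySem.Str.isIn w tl || PySem.Str.isIn tl w) = []
    · rw [if_pos hm, hm]; rfl
    · rw [if_neg hm, PySem.List.pyGet?_zero, ← List.head?_eq_getElem?, ← scan_eq_sorted_main]
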